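-- pv_equiv track=rewrite | github.com/LazyEntity/leetcode | mycrosoft/Circle.py | solution
-- ===== SOURCE A (Python) =====
-- def solution(arr):
--     idx = 0
--     result = 0
--     while idx < len(arr) - 1:
--         if (arr[idx] + arr[idx + 1]) % 2 == 0:
--             result += 1
--             idx += 1
--         idx += 1
--
--     if idx == len(arr) - 1 and (arr[0] + arr[-1]) % 2 == 0:
--         result += 1
--     return result
-- ===== SOURCE B (Python) =====
-- def solution(arr):
--     # Group-then-aggregate: run-length encode the parity sequence; sum floor(L/2)
--     # over run lengths; wrap contributes 1 when the last run is odd and the ends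
--     # have equal parity.
--     p = [x % 2 for x in arr]
--     run_lens = []
--     i = 0
--     n = len(p)
--     while i < n:
--         j = i
--         while j < n and p[j] == p[i]:
--             j += 1
--         run_lens.append(j - i)
--         i = j
--     total = sum(L // 2 for L in run_lens)
--     if p and run_lens[-1] % 2 == 1 and p[0] == p[-1]:
--         total += 1
--     return total
-- ===== Notes on version B (the rewrite author's own statement) =====
-- stated objective: alternative
-- what changed: A's stateful skip-pointer single pass (consume two elements on a match) is replaced by a group-then-aggregate strategy: run-length-encode the parity sequence, sum floor(L/2) over run lengths, and add the wrap pair exactly when the last run is odd and the two ends have equal parity.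
import Mathlib
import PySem

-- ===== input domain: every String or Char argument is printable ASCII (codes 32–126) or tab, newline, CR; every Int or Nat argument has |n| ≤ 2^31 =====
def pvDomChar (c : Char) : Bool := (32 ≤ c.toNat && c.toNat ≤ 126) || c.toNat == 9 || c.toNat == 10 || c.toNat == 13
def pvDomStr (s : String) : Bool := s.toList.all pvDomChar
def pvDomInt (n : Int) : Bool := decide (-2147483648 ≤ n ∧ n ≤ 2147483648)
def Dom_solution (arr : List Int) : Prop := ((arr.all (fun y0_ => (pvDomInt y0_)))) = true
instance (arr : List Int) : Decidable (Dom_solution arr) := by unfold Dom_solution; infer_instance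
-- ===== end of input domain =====

-- B replaces A's stateful skip-pointer pass by run-length-encoding the parity sequence
-- and summing floor(L/2) over run lengths (objective: alternative decomposition).

-- ===== PORT A =====
-- the while loop of A: state (idx, result); returns the final state
def solutionLoop (arr : List Int) (idx result : Int) : Int × Int :=
  if idx < (arr.length : Int) - 1 then
    match PySem.List.pyGet? arr idx, PySem.List.pyGet? arr (idx + 1) with
    | some a, some b =>
      if PySem.Int.mod (a + b) 2 = 0 then solutionLoop arr (idx + 2) (result + 1)
      else solutionLoop arr (idx + 1) result
    | _, _ => (idx, result)   -- unreachable: inside the loop both indices are in range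
  else (idx, result)
termination_by (((arr.length : Int) - idx).toNat)
decreasing_by all_goals omega

def solution (arr : List Int) : Int :=
  let st := solutionLoop arr 0 0
  -- arr[0], arr[-1] are evaluated only when idx == len-1 holds, which forces arr ≠ [],
  -- so the .getD 0 defaults are never used
  if st.1 = (arr.length : Int) - 1 ∧
      PySem.Int.mod ((PySem.List.pyGet? arr 0).getD 0 + (PySem.List.pyGet? arr (-1)).getD 0) 2 = 0
  then st.2 + 1 else st.2

-- ===== PORT B =====
-- inner while of Source B: number of leading elements of the suffix equal to v
def countLead (v : Int) : List Int → Nat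
  | [] => 0
  | x :: xs => if x = v then countLead v xs + 1 else 0

-- outer while of Source B: the list of maximal-run lengths
def runLens : List Int → List Int
  | [] => []
  | x :: xs => ((countLead x xs : Int) + 1) :: runLens (xs.drop (countLead x xs))
termination_by l => l.length
decreasing_by simp [List.length_drop]

def solution_alt (arr : List Int) : Int :=
  let p := arr.map (fun x => PySem.Int.mod x 2)
  let rls := runLens p
  let total := (rls.map (fun L => PySem.Int.floordiv L 2)).sum
  if p ≠ [] ∧ PySem.Int.mod (rls.getLastD 0) 2 = 1 ∧ p.headD 0 = p.getLastD 0
  then total + 1 else total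

-- ===== PRECONDITION & SPEC =====
def Spec_solution (arr : List Int) (out : Int) : Prop := out = solution_alt arr
instance (arr : List Int) (out : Int) : Decidable (Spec_solution arr out) := by unfold Spec_solution; infer_instance

-- ===== CLAIM (what is proved, stated in full; the proofs are below) =====
def Claim_equal_solution : Prop := ∀ (arr : List Int), Dom_solution arr → Spec_solution arr (solution arr)

-- ===== LEMMAS AND PROOFS =====

-- reference recursion: what A's loop computes on the suffix it has not consumed yet
-- (count of counted pairs, and whether exactly one element is left over at the end)
def fRef : List Int → Int × Bool
  | [] => (0, false)
  | [_] => (0, true)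
  | a :: b :: t =>
    if PySem.Int.mod (a + b) 2 = 0 then ((fRef t).1 + 1, (fRef t).2)
    else fRef (b :: t)
termination_by l => l.length
decreasing_by all_goals simp

lemma loop_eq (arr : List Int) (idx r : Int) (h0 : 0 ≤ idx) (h1 : idx ≤ arr.length) :
    solutionLoop arr idx r =
      ((if (fRef (arr.drop idx.toNat)).2 then (arr.length : Int) - 1 else (arr.length : Int)),
       r + (fRef (arr.drop idx.toNat)).1) := by
  have key : ∀ (n : Nat) (idx r : Int), 0 ≤ idx → idx ≤ arr.length →
      ((arr.length : Int) - idx).toNat = n →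
      solutionLoop arr idx r =
        ((if (fRef (arr.drop idx.toNat)).2 then (arr.length : Int) - 1 else (arr.length : Int)),
         r + (fRef (arr.drop idx.toNat)).1) := by
    intro n
    induction n using Nat.strong_induction_on with
    | _ n ih =>
      intro idx r h0 h1 hn
      rw [solutionLoop]
      have hdlen : (arr.drop idx.toNat).length = arr.length - idx.toNat := List.length_drop
      by_cases hlt : idx < (arr.length : Int) - 1
      · rw [if_pos hlt]
        -- the suffix has at least two elements
        match hd : arr.drop idx.toNat with
        | [] => rw [hd] at hdlen; simp at hdlen; omega
        | [x] => rw [hd] at hdlen; simp at hdlen; omega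
        | a :: b :: t =>
          have hga : PySem.List.pyGet? arr idx = some a := by
            have h' : (arr.drop idx.toNat)[0]? = some a := by rw [hd]; rfl
            rw [List.getElem?_drop] at h'
            rw [PySem.List.pyGet?_of_nonneg arr h0]
            simpa using h'
          have hgb : PySem.List.pyGet? arr (idx + 1) = some b := by
            have h' : (arr.drop idx.toNat)[1]? = some b := by rw [hd]; rfl
            rw [List.getElem?_drop] at h'
            rw [PySem.List.pyGet?_of_nonneg arr (by omega : (0:Int) ≤ idx + 1)]
            have h1' : (idx + 1).toNat = idx.toNat + 1 := by omega
            rw [h1']; exact h'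
          have hda : arr.drop (idx + 1).toNat = b :: t := by
            have h' : (arr.drop idx.toNat).drop 1 = b :: t := by rw [hd]; rfl
            rw [List.drop_drop] at h'
            have h1' : (idx + 1).toNat = idx.toNat + 1 := by omega
            rw [h1']
            simpa [Nat.add_comm] using h'
          have hdb : arr.drop (idx + 2).toNat = t := by
            have h' : (arr.drop idx.toNat).drop 2 = t := by rw [hd]; rfl
            rw [List.drop_drop] at h'
            have h2' : (idx + 2).toNat = idx.toNat + 2 := by omega
            rw [h2']
            simpa [Nat.add_comm] using h'
          rw [hga, hgb]
          dsimp only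
          have hlen2 : idx.toNat + 2 ≤ arr.length := by rw [hd] at hdlen; simp at hdlen; omega
          by_cases hm : PySem.Int.mod (a + b) 2 = 0
          · rw [if_pos hm,
              ih (((arr.length : Int) - (idx + 2)).toNat) (by omega) (idx + 2) (r + 1)
                (by omega) (by omega) rfl, hdb]
            simp only [fRef, if_pos hm]
            refine Prod.ext rfl ?_
            simp; ring
          · rw [if_neg hm,
              ih (((arr.length : Int) - (idx + 1)).toNat) (by omega) (idx + 1) r
                (by omega) (by omega) rfl, hda]
            simp only [fRef, if_neg hm]
      · rw [if_neg hlt]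
        match hd : arr.drop idx.toNat with
        | [] =>
          rw [hd] at hdlen; simp at hdlen
          simp only [fRef]
          refine Prod.ext ?_ ?_ <;> simp <;> omega
        | [x] =>
          rw [hd] at hdlen; simp at hdlen
          simp only [fRef]
          refine Prod.ext ?_ ?_ <;> simp <;> omega
        | a :: b :: t =>
          rw [hd] at hdlen; simp at hdlen; omega
  exact key _ idx r h0 h1 rfl

lemma mod_add_eq_zero_iff (a b : Int) :
    PySem.Int.mod (a + b) 2 = 0 ↔ PySem.Int.mod a 2 = PySem.Int.mod b 2 := by
  rw [PySem.Int.mod_eq_emod_of_pos (by omega : (0:Int) < 2),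
    PySem.Int.mod_eq_emod_of_pos (by omega : (0:Int) < 2),
    PySem.Int.mod_eq_emod_of_pos (by omega : (0:Int) < 2)]
  omega

lemma fRef_eq (arr : List Int) :
    (fRef arr).1 =
      ((runLens (arr.map (fun x => PySem.Int.mod x 2))).map (fun L => PySem.Int.floordiv L 2)).sum ∧
    ((fRef arr).2 = true ↔ arr ≠ [] ∧
      PySem.Int.mod ((runLens (arr.map (fun x => PySem.Int.mod x 2))).getLastD 0) 2 = 1) := by
  fun_induction fRef arr with
  | case1 => simp [runLens]
  | case2 x => simp [runLens, countLead, PySem.Int.floordiv, PySem.Int.mod]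
  | case3 a b t hm ih =>
    obtain ⟨ihs, ihb⟩ := ih
    have hpb : PySem.Int.mod b 2 = PySem.Int.mod a 2 := ((mod_add_eq_zero_iff a b).1 hm).symm
    have e2 : ∀ x : Int, PySem.Int.floordiv x 2 = x / 2 :=
      fun x => PySem.Int.floordiv_eq_ediv_of_pos (by omega)
    have m2 : ∀ x : Int, PySem.Int.mod x 2 = x % 2 :=
      fun x => PySem.Int.mod_eq_emod_of_pos (by omega)
    cases t with
    | nil =>
      refine ⟨?_, ?_⟩
      · simp only [fRef, List.map_cons, List.map_nil, hpb, runLens, countLead,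
          eq_self_iff_true, if_true, List.drop_succ_cons, List.drop_nil, List.sum_cons,
          List.sum_nil, e2]
        omega
      · simp only [fRef, List.map_cons, List.map_nil, hpb, runLens, countLead,
          eq_self_iff_true, if_true, List.drop_succ_cons, List.drop_nil,
          List.getLastD_cons, List.getLastD_nil, m2]
        have hpb' : b % 2 = a % 2 := by rw [← m2, ← m2]; exact hpb
        simp [hpb', runLens]
    | cons c t' =>
      by_cases hc : PySem.Int.mod c 2 = PySem.Int.mod a 2
      · simp only [List.map_cons, hpb, hc, runLens, countLead, eq_self_iff_true, if_true,
          List.drop_succ_cons] at ihs ihb ⊢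
        refine ⟨?_, ?_⟩
        · rw [ihs]
          simp only [List.map_cons, List.sum_cons, e2]
          push_cast
          omega
        · rw [ihb]
          simp only [ne_eq, reduceCtorEq, not_false_iff, true_and]
          generalize runLens (List.drop (countLead (PySem.Int.mod a 2)
            (List.map (fun x => PySem.Int.mod x 2) t')) (List.map (fun x => PySem.Int.mod x 2) t')) = tl
          cases tl with
          | nil =>
            simp only [List.getLastD_cons, List.getLastD_nil, m2]
            push_cast
            omega
          | cons g tl' => simp only [List.getLastD_cons]
      · have hc' : (PySem.Int.mod c 2 = PySem.Int.mod a 2) = False := by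
          simp only [eq_iff_iff, iff_false]; exact hc
        simp only [List.map_cons, hpb, runLens, countLead, hc', eq_self_iff_true, if_true,
          if_false, List.drop_succ_cons, List.drop_zero] at ihs ihb ⊢
        refine ⟨?_, ?_⟩
        · rw [ihs]
          simp only [List.map_cons, List.sum_cons, e2]
          push_cast
          omega
        · rw [ihb]
          simp only [ne_eq, reduceCtorEq, not_false_iff, true_and, List.getLastD_cons]
  | case4 a b t hm ih =>
    obtain ⟨ihs, ihb⟩ := ih
    have hpb : (PySem.Int.mod b 2 = PySem.Int.mod a 2) = False := by
      simp only [eq_iff_iff, iff_false]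
      intro h
      exact hm ((mod_add_eq_zero_iff a b).2 h.symm)
    have e2 : ∀ x : Int, PySem.Int.floordiv x 2 = x / 2 :=
      fun x => PySem.Int.floordiv_eq_ediv_of_pos (by omega)
    refine ⟨?_, ?_⟩
    · rw [ihs]
      simp only [List.map_cons, runLens, countLead, hpb, if_false, List.drop_zero,
        List.sum_cons, e2]
      omega
    · rw [ihb]
      simp only [List.map_cons, runLens, countLead, hpb, if_false, List.drop_zero,
        ne_eq, reduceCtorEq, not_false_iff, true_and, List.getLastD_cons]

-- ===== VERDICT (by name: the statement is the Claim_ definition above) =====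
theorem solution_spec : Claim_equal_solution := by
  intro arr _
  unfold Spec_solution
  cases arr with
  | nil => simp [solution, solution_alt, solutionLoop, runLens]
  | cons x xs =>
    obtain ⟨hs, hb⟩ := fRef_eq (x :: xs)
    have hne : (x :: xs : List Int) ≠ [] := by simp
    have hg : (x :: xs).getLast? = some ((x :: xs).getLast hne) :=
      List.getLast?_eq_some_getLast hne
    have hA : (PySem.List.pyGet? (x :: xs) 0).getD 0 = x := by
      rw [PySem.List.pyGet?_zero_cons]; rfl
    have hB : (PySem.List.pyGet? (x :: xs) (-1)).getD 0 = (x :: xs).getLast hne := by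
      rw [PySem.List.pyGet?_neg_one, hg]; rfl
    have hHead : ((x :: xs).map (fun y => PySem.Int.mod y 2)).headD 0 = PySem.Int.mod x 2 := by
      simp
    have hLast : ((x :: xs).map (fun y => PySem.Int.mod y 2)).getLastD 0 =
        PySem.Int.mod ((x :: xs).getLast hne) 2 := by
      rw [List.getLastD_eq_getLast?, List.getLast?_map, hg]; rfl
    simp only [solution, solution_alt]
    rw [loop_eq (x :: xs) 0 0 (by omega) (by exact_mod_cast Nat.zero_le _)]
    simp only [Int.toNat_zero, List.drop_zero, zero_add, hA, hB, hHead, hLast, hs]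
    by_cases h2 : (fRef (x :: xs)).2 = true
    · have hlast1 : PySem.Int.mod
          ((runLens ((x :: xs).map (fun y => PySem.Int.mod y 2))).getLastD 0) 2 = 1 :=
        (hb.1 h2).2
      by_cases hm : PySem.Int.mod (x + (x :: xs).getLast hne) 2 = 0
      · have hmm : PySem.Int.mod x 2 = PySem.Int.mod ((x :: xs).getLast hne) 2 :=
          (mod_add_eq_zero_iff _ _).1 hm
        have m2 : ∀ y : Int, PySem.Int.mod y 2 = y % 2 :=
          fun y => PySem.Int.mod_eq_emod_of_pos (by omega)
        simp only [m2, List.map_cons, List.getLastD_eq_getLast?] at hmm hlast1 hm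
        simp [h2]
        rw [if_pos (by omega : (2:Int) ∣ x + (x :: xs).getLast hne),
          if_pos ⟨hlast1, hmm⟩]
      · have hmm : ¬ PySem.Int.mod x 2 = PySem.Int.mod ((x :: xs).getLast hne) 2 :=
          fun h => hm ((mod_add_eq_zero_iff _ _).2 h)
        have m2 : ∀ y : Int, PySem.Int.mod y 2 = y % 2 :=
          fun y => PySem.Int.mod_eq_emod_of_pos (by omega)
        simp only [m2, List.map_cons, List.getLastD_eq_getLast?] at hmm hlast1
        have hm' : ¬ (x + (x :: xs).getLast hne) % 2 = 0 := by
          rw [← m2]; exact hm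
        simp [h2]
        rw [if_neg (by omega : ¬ (2:Int) ∣ x + (x :: xs).getLast hne),
          if_neg (fun h => hmm h.2)]
    · have hlen : ¬ ((x :: xs).length : Int) = ((x :: xs).length : Int) - 1 := by omega
      have hlast1 : ¬ PySem.Int.mod
          ((runLens ((x :: xs).map (fun y => PySem.Int.mod y 2))).getLastD 0) 2 = 1 :=
        fun h => h2 (hb.2 ⟨hne, h⟩)
      have m2 : ∀ y : Int, PySem.Int.mod y 2 = y % 2 :=
        fun y => PySem.Int.mod_eq_emod_of_pos (by omega)
      simp only [m2, List.map_cons, List.getLastD_eq_getLast?] at hlast1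
      simp [h2]
      exact fun h => absurd h hlast1
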